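-- pv_equiv track=rewrite | github.com/itayeylath/python-uni-course | hw1.py | odd_factorial2
-- ===== SOURCE A (Python) =====
-- def odd_factorial2(n):
--     x = 1
--     i = 1
--     while i <= n:
--         if i % 2 == 1:  # Check if i is odd
--             x = x * i
--         i = i + 1
--
--     return x
-- ===== SOURCE B (Python) =====
-- import math
--
-- def odd_factorial2(n):
--     if n < 1:
--         return 1
--     k = n // 2
--     return math.factorial(n) // (2 ** k * math.factorial(k))
-- ===== Notes on version B (the rewrite author's own statement) =====
-- stated objective: alternative
-- what changed: Replaces the while-loop with a per-element parity branch by the closed-form identity: product of odds up to n equals n! // (2**(n//2) * (n//2)!), computed with math.factorial; it trades the loop for one exact big-integer division.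
import Mathlib
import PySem

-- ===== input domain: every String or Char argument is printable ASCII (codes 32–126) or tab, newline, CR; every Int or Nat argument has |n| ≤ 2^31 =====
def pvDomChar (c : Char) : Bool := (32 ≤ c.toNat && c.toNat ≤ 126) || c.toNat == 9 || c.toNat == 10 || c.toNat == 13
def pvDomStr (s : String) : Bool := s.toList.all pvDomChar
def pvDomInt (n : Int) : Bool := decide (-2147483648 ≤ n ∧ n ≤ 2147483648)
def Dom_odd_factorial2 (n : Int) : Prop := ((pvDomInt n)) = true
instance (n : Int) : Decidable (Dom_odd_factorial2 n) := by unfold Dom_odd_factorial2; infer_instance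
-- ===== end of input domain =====

-- B replaces A's accumulator while-loop by the closed-form identity
-- (product of odds up to n) = n! // (2^(n//2) * (n//2)!); alternative decomposition, not claimed faster.

-- ===== PORT A =====
-- the while-loop: fuel = number of remaining iterations (sufficient since i increases by 1)
def oddLoopA (fuel : Nat) (n : Int) (x i : Int) : Int :=
  match fuel with
  | 0 => x
  | f + 1 =>
      if i ≤ n then
        oddLoopA f n (if PySem.Int.mod i 2 = 1 then x * i else x) (i + 1)
      else x

def odd_factorial2 (n : Int) : Int := oddLoopA n.toNat n 1 1

-- ===== PORT B =====
def odd_factorial2_alt (n : Int) : Int :=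
  if n < 1 then 1
  else
    let k := PySem.Int.floordiv n 2
    PySem.Int.floordiv (Int.ofNat (Nat.factorial n.toNat))
      ((2 : Int) ^ k.toNat * Int.ofNat (Nat.factorial k.toNat))

-- ===== PRECONDITION & SPEC =====
def Spec_odd_factorial2 (n : Int) (out : Int) : Prop := out = odd_factorial2_alt n
instance (n : Int) (out : Int) : Decidable (Spec_odd_factorial2 n out) := by unfold Spec_odd_factorial2; infer_instance

-- ===== CLAIM (what is proved, stated in full; the proofs are below) =====
def Claim_equal_odd_factorial2 : Prop := ∀ (n : Int), Dom_odd_factorial2 n → Spec_odd_factorial2 n (odd_factorial2 n)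

-- ===== LEMMAS AND PROOFS =====

-- the product of the odd numbers in [1, m], as a top-recursion
def oddProd : Nat → Int
  | 0 => 0 + 1
  | m + 1 => if PySem.Int.mod ((m : Int) + 1) 2 = 1 then oddProd m * ((m : Int) + 1) else oddProd m

-- the loop is insensitive to the bound while fuel keeps i within both bounds
theorem oddLoopA_bound_irrel (f : Nat) (n n' x i : Int)
    (h : i + f ≤ n + 1) (h' : i + f ≤ n' + 1) :
    oddLoopA f n x i = oddLoopA f n' x i := by
  induction f generalizing x i with
  | zero => rfl
  | succ f ih =>
      have hi : i ≤ n := by omega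
      have hi' : i ≤ n' := by omega
      simp only [oddLoopA, hi, hi', if_pos]
      exact ih _ _ (by omega) (by omega)

-- peel the LAST iteration off the loop
theorem oddLoopA_snoc (f : Nat) (n x i : Int) (h : i + f ≤ n) :
    oddLoopA (f + 1) n x i =
      (if PySem.Int.mod (i + f) 2 = 1 then oddLoopA f n x i * (i + f) else oddLoopA f n x i) := by
  induction f generalizing x i with
  | zero =>
      have hi : i ≤ n := by omega
      simp [oddLoopA, hi]
  | succ f ih =>
      have hi : i ≤ n := by omega
      have e1 : oddLoopA (f + 1 + 1) n x i
          = oddLoopA (f + 1) n (if PySem.Int.mod i 2 = 1 then x * i else x) (i + 1) := by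
        conv_lhs => rw [oddLoopA]
        rw [if_pos hi]
      have e2 : oddLoopA (f + 1) n x i
          = oddLoopA f n (if PySem.Int.mod i 2 = 1 then x * i else x) (i + 1) := by
        conv_lhs => rw [oddLoopA]
        rw [if_pos hi]
      have e3 : i + 1 + (f : Int) = i + ((f : Nat) + 1 : Nat) := by push_cast; ring
      rw [e1, ih _ (i + 1) (by omega), e2, e3]

theorem oddLoopA_eq_oddProd (m : Nat) (n : Int) (hn : n = m) :
    oddLoopA m n 1 1 = oddProd m := by
  induction m generalizing n with
  | zero => simp [oddLoopA, oddProd]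
  | succ m ih =>
      have h1 : (1 : Int) + m ≤ n := by omega
      rw [oddLoopA_snoc m n 1 1 h1]
      have hb : oddLoopA m n 1 1 = oddLoopA m (m : Int) 1 1 :=
        oddLoopA_bound_irrel m n (m : Int) 1 1 (by omega) (by omega)
      rw [hb, ih (m : Int) rfl]
      have : (1 : Int) + m = (m : Int) + 1 := by ring
      rw [this]
      rfl

theorem odd_factorial2_eq_oddProd (n : Int) : odd_factorial2 n = oddProd n.toNat := by
  unfold odd_factorial2
  by_cases h : n ≤ 0
  · have : n.toNat = 0 := by omega
    rw [this]; rfl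
  · exact oddLoopA_eq_oddProd n.toNat n (by omega)

-- the factorial identity: oddProd m * (2^(m/2) * (m/2)!) = m!
theorem oddProd_mul_even (m : Nat) :
    oddProd m * ((2 : Int) ^ (m / 2) * Int.ofNat (Nat.factorial (m / 2))) =
      Int.ofNat (Nat.factorial m) := by
  induction m with
  | zero => simp [oddProd, Nat.factorial]
  | succ m ih =>
      have hfact : (Nat.factorial (m + 1) : Int) = ((m : Int) + 1) * Nat.factorial m := by
        push_cast [Nat.factorial]; ring
      rcases Nat.even_or_odd m with ⟨t, rfl⟩ | ⟨t, rfl⟩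
      · -- m = t + t even, m + 1 odd
        have hmod : PySem.Int.mod (((t + t : Nat) : Int) + 1) 2 = 1 := by
          rw [PySem.Int.mod_eq_emod_of_pos (by omega)]
          omega
        have hdiv : (t + t + 1) / 2 = (t + t) / 2 := by omega
        simp only [oddProd, hmod, if_pos, hdiv, Int.ofNat_eq_natCast] at *
        rw [hfact]
        calc oddProd (t + t) * (((t + t : Nat) : Int) + 1) *
                ((2 : Int) ^ ((t + t) / 2) * (Nat.factorial ((t + t) / 2) : Int))
            = (oddProd (t + t) * ((2 : Int) ^ ((t + t) / 2) * (Nat.factorial ((t + t) / 2) : Int))) *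
                (((t + t : Nat) : Int) + 1) := by ring
          _ = (((t + t : Nat) : Int) + 1) * (Nat.factorial (t + t) : Int) := by rw [ih]; ring
      · -- m = 2t + 1 odd, m + 1 even
        have hmod : ¬ PySem.Int.mod (((2 * t + 1 : Nat) : Int) + 1) 2 = 1 := by
          rw [PySem.Int.mod_eq_emod_of_pos (by omega)]; omega
        have hmod2 : PySem.Int.mod (((2 * t : Nat) : Int) + 1) 2 = 1 := by
          rw [PySem.Int.mod_eq_emod_of_pos (by omega)]; omega
        have hdiv : (2 * t + 1 + 1) / 2 = t + 1 := by omega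
        have hq : (2 * t + 1) / 2 = t := by omega
        rw [hq] at ih
        simp only [oddProd, Int.ofNat_eq_natCast] at ih ⊢
        rw [if_neg hmod, if_pos hmod2]
        rw [if_pos hmod2] at ih
        rw [hdiv, hfact]
        have hfk : (Nat.factorial (t + 1) : Int) = ((t : Int) + 1) * Nat.factorial t := by
          push_cast [Nat.factorial]; ring
        rw [hfk, pow_succ]
        calc oddProd (2 * t) * (((2 * t : Nat) : Int) + 1) *
                ((2 : Int) ^ t * 2 * (((t : Int) + 1) * (Nat.factorial t : Int)))
            = (oddProd (2 * t) * (((2 * t : Nat) : Int) + 1) * ((2 : Int) ^ t * (Nat.factorial t : Int))) *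
                (2 * ((t : Int) + 1)) := by ring
          _ = (Nat.factorial (2 * t + 1) : Int) * (2 * ((t : Int) + 1)) := by rw [ih]
          _ = (((2 * t + 1 : Nat) : Int) + 1) * (Nat.factorial (2 * t + 1) : Int) := by
              push_cast; ring

theorem odd_factorial2_spec : Claim_equal_odd_factorial2 := by
  intro n _
  unfold Spec_odd_factorial2 odd_factorial2_alt
  rw [odd_factorial2_eq_oddProd]
  by_cases h : n < 1
  · have : n.toNat = 0 := by omega
    simp [h, this, oddProd]
  · simp only [h, if_neg, not_false_iff]
    have hk : (PySem.Int.floordiv n 2).toNat = n.toNat / 2 := by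
      rw [PySem.Int.floordiv_eq_ediv_of_pos (by omega)]
      omega
    rw [hk]
    have hfp : (0 : Int) < Int.ofNat (Nat.factorial (n.toNat / 2)) := by
      simp only [Int.ofNat_eq_natCast]
      exact_mod_cast Nat.factorial_pos _
    have hd : (0 : Int) < (2 : Int) ^ (n.toNat / 2) * Int.ofNat (Nat.factorial (n.toNat / 2)) :=
      mul_pos (pow_pos (by norm_num) _) hfp
    rw [← oddProd_mul_even n.toNat]
    rw [PySem.Int.floordiv_eq_ediv_of_pos hd]
    exact (Int.mul_ediv_cancel _ (by omega)).symm
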